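-- pv_equiv track=rewrite | github.com/artisan1218/LeetCode-Solution | solutions/inversion/inversion.py | inversion2
-- ===== SOURCE A (Python) =====
-- def inversion2(arr):
--     def helper (arr, curSeq, idx):
--         if len(curSeq)== 3:
--             result.append(curSeq)
--         else:
--             for i in range(idx, len(arr)) :
--                 if len(curSeq)==0 or arr[i] < curSeq[-1]:
--                     helper(arr, curSeq+[arr[i]], i + 1)
--
--     result = list()
--     seen = set()
--     uniqueArr = list()
--     for num in arr:
--         if num not in seen:
--             seen.add(num)
--             uniqueArr.append(num)
--
--     helper (uniqueArr, [], 0)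
--     return result
-- ===== SOURCE B (Python) =====
-- def inversion2(arr):
--     seen = set()
--     uniqueArr = list()
--     for num in arr:
--         if num not in seen:
--             seen.add(num)
--             uniqueArr.append(num)
--
--     n = len(uniqueArr)
--     result = []
--     for i in range(n):
--         for j in range(i + 1, n):
--             if uniqueArr[j] < uniqueArr[i]:
--                 for k in range(j + 1, n):
--                     if uniqueArr[k] < uniqueArr[j]:
--                         result.append([uniqueArr[i], uniqueArr[j], uniqueArr[k]])
--     return result
-- ===== Notes on version B (the rewrite author's own statement) =====
-- stated objective: simpler
-- what changed: Replaced the depth-3 backtracking recursion (building curSeq and appending at depth 3) with three explicit nested index loops that append each decreasing triple directly.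
import Mathlib
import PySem

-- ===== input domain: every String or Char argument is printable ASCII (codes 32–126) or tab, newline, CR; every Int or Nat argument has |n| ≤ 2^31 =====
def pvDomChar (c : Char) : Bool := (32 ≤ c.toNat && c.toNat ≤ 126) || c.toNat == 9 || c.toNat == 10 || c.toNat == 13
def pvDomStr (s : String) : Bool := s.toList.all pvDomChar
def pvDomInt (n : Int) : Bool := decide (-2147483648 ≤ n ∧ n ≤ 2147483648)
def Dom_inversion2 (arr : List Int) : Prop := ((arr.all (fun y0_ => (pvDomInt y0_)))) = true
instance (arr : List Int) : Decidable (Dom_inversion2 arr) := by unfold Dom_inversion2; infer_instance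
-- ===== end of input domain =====

-- B replaces A's depth-3 backtracking recursion with three explicit nested index loops (objective: simpler).

-- ===== PORT A =====
-- the order-preserving dedup (seen : set, uniqueArr : list), shared verbatim by both Pythons
def pvDedup (arr : List Int) : List Int :=
  (arr.foldl
    (fun (p : PySem.Set Int × List Int) num =>
      if PySem.Set.contains p.1 num then p else (PySem.Set.add p.1 num, p.2 ++ [num]))
    (PySem.Set.empty, [])).2

-- A's recursive helper; fuel only makes the fixed-depth recursion structural (4 suffices, never exhausted)
def pvHelperA : Nat → List Int → List Int → Int → List (List Int) → List (List Int)
  | 0, _, _, _, res => res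
  | fuel+1, arr, curSeq, idx, res =>
      if curSeq.length == 3 then res ++ [curSeq]
      else
        (PySem.List.pyRange idx arr.length 1).foldl
          (fun r i =>
            if (curSeq.length == 0 ||
                decide (PySem.List.pyGetD arr i 0 < PySem.List.pyGetD curSeq (-1) 0)) then
              pvHelperA fuel arr (curSeq ++ [PySem.List.pyGetD arr i 0]) (i + 1) r
            else r)
          res

def inversion2 (arr : List Int) : List (List Int) :=
  pvHelperA 4 (pvDedup arr) [] 0 []

-- ===== PORT B =====
def inversion2_alt (arr : List Int) : List (List Int) :=
  let u := pvDedup arr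
  let n : Int := u.length
  (PySem.List.pyRange 0 n 1).foldl
    (fun r i =>
      (PySem.List.pyRange (i + 1) n 1).foldl
        (fun r j =>
          if PySem.List.pyGetD u j 0 < PySem.List.pyGetD u i 0 then
            (PySem.List.pyRange (j + 1) n 1).foldl
              (fun r k =>
                if PySem.List.pyGetD u k 0 < PySem.List.pyGetD u j 0 then
                  r ++ [[PySem.List.pyGetD u i 0, PySem.List.pyGetD u j 0,
                         PySem.List.pyGetD u k 0]]
                else r)
              r
          else r)
        r)
    []

-- ===== PRECONDITION & SPEC =====
def Spec_inversion2 (arr : List Int) (out : List (List Int)) : Prop := out = inversion2_alt arr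
instance (arr : List Int) (out : List (List Int)) : Decidable (Spec_inversion2 arr out) := by unfold Spec_inversion2; infer_instance

-- ===== CLAIM (what is proved, stated in full; the proofs are below) =====
def Claim_equal_inversion2 : Prop := ∀ (arr : List Int), Dom_inversion2 arr → Spec_inversion2 arr (inversion2 arr)

-- ===== LEMMAS AND PROOFS =====

theorem pvHelperA_len2 (m : Nat) (u : List Int) (a b : Int) (idx : Int)
    (res : List (List Int)) :
    pvHelperA (m + 2) u [a, b] idx res =
      (PySem.List.pyRange idx u.length 1).foldl
        (fun r k =>
          if PySem.List.pyGetD u k 0 < b then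
            r ++ [[a, b, PySem.List.pyGetD u k 0]]
          else r)
        res := by
  show (if ([a, b].length == 3) then _ else _) = _
  simp only [List.length_cons, List.length_nil]
  norm_num
  apply PySem.List.foldl_congr_mem
  intro r k _
  have hlast : PySem.List.pyGetD [a, b] (-1) 0 = b := by
    simpa using PySem.List.pyGetD_neg_one_append_singleton (xs := [a]) (x := b) (d := 0)
  simp only [hlast]
  split
  · show (if (([a, b, _].length : Nat) == 3) then _ else _) = _
    simp
  · rfl

theorem pvHelperA_len1 (m : Nat) (u : List Int) (a : Int) (idx : Int)
    (res : List (List Int)) :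
    pvHelperA (m + 3) u [a] idx res =
      (PySem.List.pyRange idx u.length 1).foldl
        (fun r j =>
          if PySem.List.pyGetD u j 0 < a then
            (PySem.List.pyRange (j + 1) u.length 1).foldl
              (fun r k =>
                if PySem.List.pyGetD u k 0 < PySem.List.pyGetD u j 0 then
                  r ++ [[a, PySem.List.pyGetD u j 0, PySem.List.pyGetD u k 0]]
                else r)
              r
          else r)
        res := by
  show (if ([a].length == 3) then _ else _) = _
  simp only [List.length_cons, List.length_nil]
  norm_num
  apply PySem.List.foldl_congr_mem
  intro r j _
  have hlast : PySem.List.pyGetD [a] (-1) 0 = a := by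
    simpa using PySem.List.pyGetD_neg_one_append_singleton (xs := []) (x := a) (d := 0)
  simp only [hlast]
  split
  · exact pvHelperA_len2 m u a _ _ r
  · rfl

theorem pvHelperA_len0 (m : Nat) (u : List Int) (idx : Int) (res : List (List Int)) :
    pvHelperA (m + 4) u [] idx res =
      (PySem.List.pyRange idx u.length 1).foldl
        (fun r i =>
          (PySem.List.pyRange (i + 1) u.length 1).foldl
            (fun r j =>
              if PySem.List.pyGetD u j 0 < PySem.List.pyGetD u i 0 then
                (PySem.List.pyRange (j + 1) u.length 1).foldl
                  (fun r k =>
                    if PySem.List.pyGetD u k 0 < PySem.List.pyGetD u j 0 then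
                      r ++ [[PySem.List.pyGetD u i 0, PySem.List.pyGetD u j 0,
                             PySem.List.pyGetD u k 0]]
                    else r)
                  r
              else r)
            r)
        res := by
  show (if (([] : List Int).length == 3) then _ else _) = _
  simp only [List.length_nil]
  norm_num
  apply PySem.List.foldl_congr_mem
  intro r i _
  simpa using pvHelperA_len1 m u (PySem.List.pyGetD u i 0) (i + 1) r

-- ===== VERDICT (by name: the statement is the Claim_ definition above) =====
theorem inversion2_spec : Claim_equal_inversion2 := by
  intro arr _
  unfold Spec_inversion2 inversion2 inversion2_alt
  exact pvHelperA_len0 0 (pvDedup arr) 0 []
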